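-- pv_equiv track=rewrite | github.com/JakubMlocek/Algorithms_and_Data_Structures | ASD2021/retake/exams/egz2019_20_1.py | opt_sum
-- ===== SOURCE A (Python) =====
-- def opt_sum(tab):
--     # funkcje zwracające liczbę o odpowiednio mniejszej/większej wartości bezwzględnej
--     def min_abs_val(a,b):
--         if abs(a) < abs(b) :
--             return a
--         else:
--             return b
--
--     def max_abs_val(a,b):
--         if abs(a) > abs(b) :
--             return a
--         else:
--             return b
--
--     # aby mieć na bieżąco dostęp do sumy w danym przedziale tworzymy sobie
--     # pomocniczo tablicę sum prefixowych - wtedy suma [i,j] to prefix[j+1] - prefix[i]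
--
--     n=len(tab)
--     prefix = [None]*(n+1)
--     prefix[0] = 0
--
--     for i in range(1,n+1):
--         prefix[i] = prefix[i-1] + tab[i-1]
--
--     memo = [[0]*n for _ in range(n)]
--     # w memo[i][j] zapamiętujemy wartość sumy tymczasowej, której wartość bezwzględna
--     # na danym przedziale jest minimalna (z maksymalnych)
--
--     # rozważamy coraz dłuższe przedziały
--     for length in range(1,n):
--         for start in range(n-length):
--             end = start + length
--
--             # na początek do memo wpisujemy sumę danego przedziału - wyliczoną za pomocą
--             # tablicy sum prefiksowych
--
--             memo[start][end] = prefix[end+1] - prefix[start]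
--
--             # dla każdego przedziału sprawdzamy, które 2 podprzedziały najlepiej
--             # dodać do siebie (tak, by max suma tymczasowa była jak najmniejsza)
--             # k jest "punktem podziału", bierzemy przedziały [start,k] oraz [k+1,end]
--
--             best = float("inf")
--
--             for k in range(start,end):
--                 best = min_abs_val(max_abs_val(memo[start][k], memo[k+1][end]), best)
--
--             # do memo wpisujemy wartość z najlepszego podziału lub sumę całego przedziału,
--             # jeśli jej wartość bezwzględna jest większa
--
--             memo[start][end]=max_abs_val(best,memo[start][end])
--
--     return abs(memo[0][n-1])
-- ===== SOURCE B (Python) =====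
-- def opt_sum(tab):
--     # B: top-down memoized recursion over intervals; memo[i][j] is None until solved.
--     n = len(tab)
--     prefix = [0] * (n + 1)
--     for i in range(n):
--         prefix[i + 1] = prefix[i] + tab[i]
--
--     memo = [[None] * n for _ in range(n)]
--
--     def solve(i, j):
--         if i >= j:
--             return 0
--         v = memo[i][j]
--         if v is not None:
--             return v
--         s = prefix[j + 1] - prefix[i]
--         best = None
--         row = memo[i]
--         for k in range(i, j):
--             a = row[k]
--             if a is None:
--                 a = solve(i, k)
--             b = memo[k + 1][j]
--             if b is None:
--                 b = solve(k + 1, j)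
--             v = a if abs(a) > abs(b) else b
--             if best is None or abs(v) < abs(best):
--                 best = v
--         res = best if abs(best) > abs(s) else s
--         memo[i][j] = res
--         return res
--
--     return abs(solve(0, n - 1))
-- ===== Notes on version B (the rewrite author's own statement) =====
-- stated objective: alternative
-- what changed: Replaces A's bottom-up interval DP (nested length/start loops filling an n*n table) by a top-down memoized recursion solve(i,j) over intervals with a dict cache, keeping the same prefix-sum array and the exact min/max-abs tie rules.
import Mathlib
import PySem

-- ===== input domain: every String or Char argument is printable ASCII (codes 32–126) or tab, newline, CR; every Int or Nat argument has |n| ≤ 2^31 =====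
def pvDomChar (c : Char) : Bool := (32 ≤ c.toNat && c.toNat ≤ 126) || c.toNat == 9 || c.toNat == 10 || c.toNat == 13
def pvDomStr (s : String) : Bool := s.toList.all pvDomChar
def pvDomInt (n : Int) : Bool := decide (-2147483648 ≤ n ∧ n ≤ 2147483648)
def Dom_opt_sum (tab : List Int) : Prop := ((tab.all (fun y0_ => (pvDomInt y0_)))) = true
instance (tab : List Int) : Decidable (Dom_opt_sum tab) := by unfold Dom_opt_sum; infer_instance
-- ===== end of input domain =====

-- B replaces A's bottom-up length/start loop nest by a top-down memoized recursion
-- over intervals (same prefix sums and abs tie rules); objective: alternative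
-- decomposition.

-- ===== PORT A =====

-- min_abs_val / max_abs_val (on an abs tie both return the second argument, as in Python)
def pvMinAbs (a b : Int) : Int := if |a| < |b| then a else b

def pvMaxAbs (a b : Int) : Int := if |a| > |b| then a else b

-- prefix sums: Python preallocates [None]*(n+1), sets prefix[0]=0 and fills slots
-- 1..n left to right; ported as building the list by appends (exact: slots are
-- written in order), with the loop index shifted by one (Lean i = Python i-1).
def pvPrefixA (tab : List Int) : List Int :=
  (List.range tab.length).foldl (fun p i => p ++ [p.getD i 0 + tab.getD i 0]) [0]

-- memo[i][j] reads/writes; every access A performs on inputs in Pre_ has in-range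
-- nonnegative indices, so getD/set is exact there.
def pvGet (m : List (List Int)) (i j : Nat) : Int := (m.getD i []).getD j 0

def pvSet (m : List (List Int)) (i j : Nat) (v : Int) : List (List Int) :=
  m.set i ((m.getD i []).set j v)

-- one iteration of A's 'for start in range(n-length)' body.  best starts as
-- float("inf"); it is modeled as Option Int: min_abs_val(v, inf) = v is the 'none'
-- step.  The 'none' result case is unreachable (L >= 1 in every call).
def pvStepA (pre : List Int) (L : Nat) (m : List (List Int)) (start : Nat) :
    List (List Int) :=
  let e := start + L
  let s := pre.getD (e + 1) 0 - pre.getD start 0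
  let m1 := pvSet m start e s
  let ob := (List.range L).foldl (fun ob d =>
      let v := pvMaxAbs (pvGet m1 start (start + d)) (pvGet m1 (start + d + 1) e)
      some (match ob with | none => v | some b => pvMinAbs v b)) (none : Option Int)
  match ob with
  | none => m1
  | some b => pvSet m1 start e (pvMaxAbs b s)

-- 'for length in range(1, n)' ported over List.range (n-1) with length = L0 + 1.
def opt_sum (tab : List Int) : Int :=
  let n := tab.length
  let pre := pvPrefixA tab
  let memo0 := List.replicate n (List.replicate n (0 : Int))
  let memo := (List.range (n - 1)).foldl
      (fun m L0 => (List.range (n - (L0 + 1))).foldl (pvStepA pre (L0 + 1)) m) memo0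
  |pvGet memo 0 (n - 1)|

-- ===== PORT B =====

-- B's prefix loop: prefix[i+1] = prefix[i] + tab[i] for i in range(n), ported the
-- same way (appends, slots written in order).
def pvPrefixB (tab : List Int) : List Int :=
  (List.range tab.length).foldl (fun p i => p ++ [p.getD i 0 + tab.getD i 0]) [0]

-- memo[i][j] is None until solved: an Option Int matrix, read/written like A's.
def pvGetO (mm : List (List (Option Int))) (i j : Nat) : Option Int :=
  (mm.getD i []).getD j none

def pvSetO (mm : List (List (Option Int))) (i j : Nat) (v : Int) :
    List (List (Option Int)) :=
  mm.set i ((mm.getD i []).set j (some v))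

-- solve(i, j) with the memo matrix threaded through; Python's recursion is ported
-- with a fuel argument (the caller passes fuel = n, strictly more than any j - i
-- reached, so the fuel-0 branch is never taken on inputs in Pre_).  pvMemoGet is
-- the inlined 'a = row[k] / if a is None: a = solve(i, k)' lookup; 'best = None'
-- is the Option Int accumulator, its 'none' result case unreachable since i < j.
mutual
def pvSolveB (pre : List Int) :
    Nat → Int → Int → List (List (Option Int)) → Int × List (List (Option Int))
  | 0, _, _, mm => (0, mm)
  | fuel + 1, i, j, mm =>
    if i ≥ j then (0, mm) else
    match pvGetO mm i.toNat j.toNat with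
    | some v => (v, mm)
    | none =>
      let s := pre.getD (j + 1).toNat 0 - pre.getD i.toNat 0
      let st := (List.range (j - i).toNat).foldl
          (fun (st : Option Int × List (List (Option Int))) (d : Nat) =>
            let k := i + (d : Int)
            let p1 := pvMemoGet pre fuel i k st.2
            let p2 := pvMemoGet pre fuel (k + 1) j p1.2
            let v := pvMaxAbs p1.1 p2.1
            (some (match st.1 with | none => v | some b => pvMinAbs v b), p2.2))
          ((none : Option Int), mm)
      match st.1 with
      | none => (s, st.2)
      | some best => (pvMaxAbs best s, pvSetO st.2 i.toNat j.toNat (pvMaxAbs best s))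
termination_by fuel _ _ _ => 2 * fuel
decreasing_by all_goals omega

def pvMemoGet (pre : List Int) :
    Nat → Int → Int → List (List (Option Int)) → Int × List (List (Option Int))
  | fuel, i, j, mm =>
    match pvGetO mm i.toNat j.toNat with
    | some a => (a, mm)
    | none => pvSolveB pre fuel i j mm
termination_by fuel _ _ _ => 2 * fuel + 1
decreasing_by all_goals omega
end

def opt_sum_alt (tab : List Int) : Int :=
  let n := tab.length
  let pre := pvPrefixB tab
  let memo0 := List.replicate n (List.replicate n (none : Option Int))
  |(pvSolveB pre n 0 ((n : Int) - 1) memo0).1|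

-- ===== PRECONDITION & SPEC =====
-- Pre_ excludes only the empty list, on which A raises IndexError (indexing into
-- the empty memo table) while B returns 0.
def Pre_opt_sum (tab : List Int) : Prop := tab ≠ []
instance (tab : List Int) : Decidable (Pre_opt_sum tab) := by
  unfold Pre_opt_sum; infer_instance

def pvWitness_opt_sum : List Int := [1, -2, 3]

def Spec_opt_sum (tab : List Int) (out : Int) : Prop := out = opt_sum_alt tab
instance (tab : List Int) (out : Int) : Decidable (Spec_opt_sum tab out) := by
  unfold Spec_opt_sum; infer_instance

-- ===== CLAIM (what is proved, stated in full; the proofs are below) =====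
def Claim_equal_opt_sum : Prop :=
  ∀ (tab : List Int), Dom_opt_sum tab → Pre_opt_sum tab → Spec_opt_sum tab (opt_sum tab)

-- ===== LEMMAS AND PROOFS =====

-- Reference value of the interval DP: pvF pre fuel i j is the common DP value of
-- the interval [i, j] whenever j - i ≤ fuel; pvFI is its canonical instance.
def pvF (pre : List Int) : Nat → Nat → Nat → Int
  | 0, _, _ => 0
  | fuel + 1, i, j =>
    if j ≤ i then 0 else
      let s := pre.getD (j + 1) 0 - pre.getD i 0
      let ob := (List.range (j - i)).foldl (fun ob d =>
          let v := pvMaxAbs (pvF pre fuel i (i + d)) (pvF pre fuel (i + d + 1) j)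
          some (match ob with | none => v | some b => pvMinAbs v b)) (none : Option Int)
      match ob with
      | none => s
      | some b => pvMaxAbs b s

theorem pvF_fuel (pre : List Int) :
    ∀ (f1 f2 i j : Nat), j - i ≤ f1 → j - i ≤ f2 →
      pvF pre f1 i j = pvF pre f2 i j := by
  intro f1
  induction f1 with
  | zero =>
    intro f2 i j h1 h2
    cases f2 with
    | zero => rfl
    | succ g2 => simp only [pvF]; rw [if_pos (by omega)]
  | succ g ih =>
    intro f2 i j h1 h2
    by_cases hji : j ≤ i
    · cases f2 with
      | zero => simp only [pvF]; rw [if_pos hji]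
      | succ g2 => simp only [pvF]; rw [if_pos hji, if_pos hji]
    · cases f2 with
      | zero => omega
      | succ g2 =>
        simp only [pvF]
        rw [if_neg hji, if_neg hji]
        have hfold : (List.range (j - i)).foldl (fun ob d =>
            some (match ob with
              | none => pvMaxAbs (pvF pre g i (i + d)) (pvF pre g (i + d + 1) j)
              | some b => pvMinAbs (pvMaxAbs (pvF pre g i (i + d)) (pvF pre g (i + d + 1) j)) b)) none
          = (List.range (j - i)).foldl (fun ob d =>
            some (match ob with
              | none => pvMaxAbs (pvF pre g2 i (i + d)) (pvF pre g2 (i + d + 1) j)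
              | some b => pvMinAbs (pvMaxAbs (pvF pre g2 i (i + d)) (pvF pre g2 (i + d + 1) j)) b)) none := by
          apply PySem.List.foldl_congr_mem
          intro acc d hd
          have hd' : d < j - i := List.mem_range.mp hd
          rw [ih g2 i (i + d) (by omega) (by omega),
              ih g2 (i + d + 1) j (by omega) (by omega)]
        simp only [hfold]

def pvFI (pre : List Int) (i j : Nat) : Int := pvF pre (j - i) i j

theorem pvFI_diag (pre : List Int) (i : Nat) : pvFI pre i i = 0 := by
  unfold pvFI
  rw [show i - i = 0 from by omega]
  rfl

def pvBestFold (g : Nat → Int) (t : Nat) : Option Int :=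
  (List.range t).foldl
    (fun ob d => some (match ob with | none => g d | some b => pvMinAbs (g d) b)) none

theorem pvBestFold_succ (g : Nat → Int) (t : Nat) :
    pvBestFold g (t + 1)
      = some (match pvBestFold g t with | none => g t | some b => pvMinAbs (g t) b) := by
  simp [pvBestFold, List.range_succ]

theorem pvBestFold_isSome (g : Nat → Int) (t : Nat) (h : 0 < t) :
    (pvBestFold g t).isSome := by
  cases t with
  | zero => omega
  | succ t => rw [pvBestFold_succ]; rfl

theorem pv_foldl_range_inv {α : Type} (P : Nat → α → Prop) :
    ∀ (len : Nat) (f : α → Nat → α) (a : α), P 0 a →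
      (∀ k b, k < len → P k b → P (k + 1) (f b k)) →
      P len ((List.range len).foldl f a) := by
  intro len
  induction len with
  | zero => intro f a h0 _; simpa using h0
  | succ n ih =>
    intro f a h0 hs
    rw [List.range_succ, List.foldl_append]
    exact hs n _ (by omega) (ih f a h0 (fun k b hk => hs k b (by omega)))

theorem pvFI_eq (pre : List Int) {i j : Nat} (h : i < j) :
    pvFI pre i j
      = match pvBestFold (fun d => pvMaxAbs (pvFI pre i (i + d)) (pvFI pre (i + d + 1) j)) (j - i) with
        | none => pre.getD (j + 1) 0 - pre.getD i 0
        | some b => pvMaxAbs b (pre.getD (j + 1) 0 - pre.getD i 0) := by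
  unfold pvFI
  conv_lhs => rw [show j - i = (j - i - 1) + 1 from by omega]
  simp only [pvF]
  rw [if_neg (by omega)]
  have hfold : (List.range (j - i)).foldl (fun ob d =>
      some (match ob with
        | none => pvMaxAbs (pvF pre (j - i - 1) i (i + d)) (pvF pre (j - i - 1) (i + d + 1) j)
        | some b => pvMinAbs (pvMaxAbs (pvF pre (j - i - 1) i (i + d)) (pvF pre (j - i - 1) (i + d + 1) j)) b)) none
    = pvBestFold (fun d => pvMaxAbs (pvFI pre i (i + d)) (pvFI pre (i + d + 1) j)) (j - i) := by
    unfold pvBestFold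
    apply PySem.List.foldl_congr_mem
    intro acc d hd
    have hd' : d < j - i := List.mem_range.mp hd
    rw [pvF_fuel pre (j - i - 1) ((i + d) - i) i (i + d) (by omega) (by omega),
        pvF_fuel pre (j - i - 1) (j - (i + d + 1)) (i + d + 1) j (by omega) (by omega)]
    rfl
  rw [hfold]
  rfl

theorem pvGetD_set' {α : Type} (l : List α) (i j : Nat) (v d : α) :
    (l.set i v).getD j d = if i = j ∧ i < l.length then v else l.getD j d := by
  simp only [List.getD_eq_getElem?_getD, List.getElem?_set]
  by_cases h1 : i = j
  · by_cases h2 : i < l.length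
    · rw [if_pos h1, if_pos h2, if_pos ⟨h1, h2⟩]; rfl
    · rw [if_pos h1, if_neg h2, if_neg (by tauto), List.getElem?_eq_none (by omega)]
  · rw [if_neg h1, if_neg (by tauto)]

theorem pvGetO_pvSetO (mm : List (List (Option Int))) (i j i' j' : Nat) (v : Int) :
    pvGetO (pvSetO mm i j v) i' j'
      = if i = i' ∧ j = j' ∧ i < mm.length ∧ j < (mm.getD i []).length then some v
        else pvGetO mm i' j' := by
  unfold pvGetO pvSetO
  rw [pvGetD_set']
  by_cases h1 : i = i' ∧ i < mm.length
  · rw [if_pos h1, pvGetD_set']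
    obtain ⟨e, hl⟩ := h1
    subst e
    by_cases h2 : j = j' ∧ j < (mm.getD i []).length
    · rw [if_pos h2, if_pos ⟨rfl, h2.1, hl, h2.2⟩]
    · rw [if_neg h2, if_neg (by tauto)]
  · rw [if_neg h1, if_neg (by tauto)]

def pvInvM (pre : List Int) (mm : List (List (Option Int))) : Prop :=
  ∀ i j v, pvGetO mm i j = some v → v = pvFI pre i j

theorem pvSolveB_correct (pre : List Int) :
    ∀ (fuel : Nat) (i j : Int) (mm : List (List (Option Int))),
      0 ≤ i → i ≤ j → (j - i).toNat < fuel → pvInvM pre mm →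
      (pvSolveB pre fuel i j mm).1 = pvFI pre i.toNat j.toNat ∧
        pvInvM pre (pvSolveB pre fuel i j mm).2 := by
  intro fuel
  induction fuel with
  | zero => intro i j mm _ _ hf _; omega
  | succ fuel ih =>
    intro i j mm hi hij hf hc
    have hlook : ∀ (i' j' : Int) (mm' : List (List (Option Int))),
        0 ≤ i' → i' ≤ j' → (j' - i').toNat < fuel → pvInvM pre mm' →
        (pvMemoGet pre fuel i' j' mm').1 = pvFI pre i'.toNat j'.toNat ∧
          pvInvM pre (pvMemoGet pre fuel i' j' mm').2 := by
      intro i' j' mm' hi' hij' hf' hc'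
      simp only [pvMemoGet]
      cases hg : pvGetO mm' i'.toNat j'.toNat with
      | some a => exact ⟨hc' _ _ _ hg, hc'⟩
      | none => exact ih i' j' mm' hi' hij' hf' hc'
    by_cases hge : i ≥ j
    · have hij' : i = j := le_antisymm hij hge
      subst hij'
      simp only [pvSolveB, if_pos (le_refl i)]
      exact ⟨(pvFI_diag pre i.toNat).symm, hc⟩
    · have hlt : i < j := lt_of_not_ge hge
      simp only [pvSolveB, if_neg hge]
      cases hget : pvGetO mm i.toNat j.toNat with
      | some v => exact ⟨hc _ _ _ hget, hc⟩
      | none =>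
        set g : Nat → Int :=
          fun d => pvMaxAbs (pvFI pre i.toNat (i.toNat + d)) (pvFI pre (i.toNat + d + 1) j.toNat) with hg
        set len := (j - i).toNat with hlen
        have hfold : ∀ t : Nat, t ≤ len →
            (fun (t : Nat) (st : Option Int × List (List (Option Int))) =>
              st.1 = pvBestFold g t ∧ pvInvM pre st.2) t
            ((List.range t).foldl
              (fun (st : Option Int × List (List (Option Int))) (d : Nat) =>
                (some (match st.1 with
                  | none => pvMaxAbs (pvMemoGet pre fuel i (i + (d : Int)) st.2).1
                      (pvMemoGet pre fuel (i + (d : Int) + 1) j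
                        (pvMemoGet pre fuel i (i + (d : Int)) st.2).2).1
                  | some b => pvMinAbs
                      (pvMaxAbs (pvMemoGet pre fuel i (i + (d : Int)) st.2).1
                        (pvMemoGet pre fuel (i + (d : Int) + 1) j
                          (pvMemoGet pre fuel i (i + (d : Int)) st.2).2).1) b),
                 (pvMemoGet pre fuel (i + (d : Int) + 1) j
                   (pvMemoGet pre fuel i (i + (d : Int)) st.2).2).2))
              ((none : Option Int), mm)) := by
          intro t ht
          refine pv_foldl_range_inv
            (fun t (st : Option Int × List (List (Option Int))) =>
              st.1 = pvBestFold g t ∧ pvInvM pre st.2) t _ _ ⟨rfl, hc⟩ ?_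
          intro d st hd hst
          dsimp only at hst ⊢
          obtain ⟨h1, h2⟩ := hst
          have hd' : d < len := by omega
          have hdint : (d : Int) < j - i := by omega
          have r1 := hlook i (i + (d : Int)) st.2 hi (by omega) (by omega) h2
          have r2 := hlook (i + (d : Int) + 1) j
            (pvMemoGet pre fuel i (i + (d : Int)) st.2).2
            (by omega) (by omega) (by omega) r1.2
          refine ⟨?_, r2.2⟩
          simp only [r1.1, r2.1, h1, pvBestFold_succ]
          have e1 : (i + (d : Int)).toNat = i.toNat + d := by omega
          have e2 : (i + (d : Int) + 1).toNat = i.toNat + d + 1 := by omega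
          rw [e1, e2, hg]
        have hmain := hfold len (le_refl len)
        obtain ⟨h1, h2⟩ := hmain
        have hsome := pvBestFold_isSome g len (by omega)
        cases hbf : pvBestFold g len with
        | none => rw [hbf] at hsome; simp at hsome
        | some b =>
          rw [h1, hbf]
          simp only
          have hFij : pvMaxAbs b (pre.getD (j + 1).toNat 0 - pre.getD i.toNat 0)
              = pvFI pre i.toNat j.toNat := by
            rw [pvFI_eq pre (show i.toNat < j.toNat by omega),
                show j.toNat - i.toNat = len from by omega, ← hg, hbf,
                show (j + 1).toNat = j.toNat + 1 from by omega]
          refine ⟨hFij, ?_⟩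
          intro p q w hw
          rw [pvGetO_pvSetO] at hw
          split_ifs at hw with hcond
          · cases hw
            rw [← hcond.1, ← hcond.2.1]
            exact hFij
          · exact h2 p q w hw

theorem pvGet_pvSet (m : List (List Int)) (i j i' j' : Nat) (v : Int) :
    pvGet (pvSet m i j v) i' j'
      = if i = i' ∧ j = j' ∧ i < m.length ∧ j < (m.getD i []).length then v
        else pvGet m i' j' := by
  unfold pvGet pvSet
  rw [pvGetD_set']
  by_cases h1 : i = i' ∧ i < m.length
  · rw [if_pos h1, pvGetD_set']
    obtain ⟨e, hl⟩ := h1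
    subst e
    by_cases h2 : j = j' ∧ j < (m.getD i []).length
    · rw [if_pos h2, if_pos ⟨rfl, h2.1, hl, h2.2⟩]
    · rw [if_neg h2, if_neg (by tauto)]
  · rw [if_neg h1, if_neg (by tauto)]

def pvInvA (pre : List Int) (n : Nat) (P : Nat → Nat → Prop) (m : List (List Int)) : Prop :=
  m.length = n ∧ (∀ r ∈ m, r.length = n) ∧
  ∀ i j, i < n → j < n →
    (i ≤ j ∧ P i j → pvGet m i j = pvFI pre i j) ∧
    (¬(i ≤ j ∧ P i j) → pvGet m i j = 0)

theorem pvInvA_congr {pre : List Int} {n : Nat} {P P' : Nat → Nat → Prop}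
    {m : List (List Int)} (h : ∀ i j, i < n → j < n → i ≤ j → (P i j ↔ P' i j)) :
    pvInvA pre n P m → pvInvA pre n P' m := by
  rintro ⟨h1, h2, h3⟩
  refine ⟨h1, h2, fun i j hi hj => ?_⟩
  obtain ⟨ha, hb⟩ := h3 i j hi hj
  constructor
  · intro hq
    exact ha ⟨hq.1, (h i j hi hj hq.1).mpr hq.2⟩
  · intro hq
    apply hb
    intro hp
    exact hq ⟨hp.1, (h i j hi hj hp.1).mp hp.2⟩

theorem pvSet_length (m : List (List Int)) (i j : Nat) (v : Int) :
    (pvSet m i j v).length = m.length := List.length_set ..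

theorem pvSet_rows {n : Nat} {m : List (List Int)} (i j : Nat) (v : Int)
    (h : ∀ r ∈ m, r.length = n) : ∀ r ∈ pvSet m i j v, r.length = n := by
  intro r hr
  by_cases hi : i < m.length
  · rcases List.mem_or_eq_of_mem_set hr with h' | h'
    · exact h r h'
    · subst h'
      rw [List.length_set, List.getD_eq_getElem _ _ hi]
      exact h _ (List.getElem_mem hi)
  · rw [pvSet, List.set_eq_of_length_le (by omega)] at hr
    exact h r hr

theorem pvRow_len {n : Nat} {m : List (List Int)} (hlen : m.length = n)
    (h : ∀ r ∈ m, r.length = n) {i : Nat} (hi : i < n) :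
    (m.getD i []).length = n := by
  have hi' : i < m.length := by omega
  rw [List.getD_eq_getElem _ _ hi']
  exact h _ (List.getElem_mem hi')

theorem pvStepA_inv (pre : List Int) (n L S : Nat) (m : List (List Int))
    (hL : 1 ≤ L) (hS : S < n - L)
    (h : pvInvA pre n (fun i j => j - i < L ∨ (j - i = L ∧ i < S)) m) :
    pvInvA pre n (fun i j => j - i < L ∨ (j - i = L ∧ i < S + 1)) (pvStepA pre L m S) := by
  obtain ⟨hlen, hrows, hval⟩ := h
  have he : S + L < n := by omega
  have hrowS : (m.getD S []).length = n := pvRow_len hlen hrows (by omega)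
  have hm1len : (pvSet m S (S + L) (pre.getD (S + L + 1) 0 - pre.getD S 0)).length = n := by
    rw [pvSet_length, hlen]
  have hm1rows : ∀ r ∈ pvSet m S (S + L) (pre.getD (S + L + 1) 0 - pre.getD S 0),
      r.length = n := pvSet_rows _ _ _ hrows
  have hget1 : ∀ i j, ¬(i = S ∧ j = S + L) →
      pvGet (pvSet m S (S + L) (pre.getD (S + L + 1) 0 - pre.getD S 0)) i j = pvGet m i j := by
    intro i j hij
    rw [pvGet_pvSet, if_neg (by tauto)]
  have hgfold : (List.range L).foldl (fun ob d =>
        some (match ob with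
          | none => pvMaxAbs
              (pvGet (pvSet m S (S + L) (pre.getD (S + L + 1) 0 - pre.getD S 0)) S (S + d))
              (pvGet (pvSet m S (S + L) (pre.getD (S + L + 1) 0 - pre.getD S 0)) (S + d + 1) (S + L))
          | some b => pvMinAbs (pvMaxAbs
              (pvGet (pvSet m S (S + L) (pre.getD (S + L + 1) 0 - pre.getD S 0)) S (S + d))
              (pvGet (pvSet m S (S + L) (pre.getD (S + L + 1) 0 - pre.getD S 0)) (S + d + 1) (S + L))) b))
        (none : Option Int)
      = pvBestFold (fun d => pvMaxAbs (pvFI pre S (S + d)) (pvFI pre (S + d + 1) (S + L))) L := by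
    unfold pvBestFold
    apply PySem.List.foldl_congr_mem
    intro acc d hd
    have hd' : d < L := List.mem_range.mp hd
    rw [hget1 S (S + d) (by omega), hget1 (S + d + 1) (S + L) (by omega),
        (hval S (S + d) (by omega) (by omega)).1 ⟨by omega, Or.inl (by omega)⟩,
        (hval (S + d + 1) (S + L) (by omega) (by omega)).1 ⟨by omega, Or.inl (by omega)⟩]
  obtain ⟨b, hb⟩ := Option.isSome_iff_exists.mp
    (pvBestFold_isSome (fun d => pvMaxAbs (pvFI pre S (S + d)) (pvFI pre (S + d + 1) (S + L))) L (by omega))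
  have hstep : pvStepA pre L m S
      = pvSet (pvSet m S (S + L) (pre.getD (S + L + 1) 0 - pre.getD S 0)) S (S + L)
          (pvMaxAbs b (pre.getD (S + L + 1) 0 - pre.getD S 0)) := by
    simp only [pvStepA]
    rw [hgfold, hb]
  have hFse : pvMaxAbs b (pre.getD (S + L + 1) 0 - pre.getD S 0) = pvFI pre S (S + L) := by
    rw [pvFI_eq pre (show S < S + L by omega),
        show S + L - S = L from by omega, hb]
  rw [hstep]
  refine ⟨by rw [pvSet_length, hm1len], pvSet_rows _ _ _ hm1rows, ?_⟩
  intro i j hi hj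
  by_cases hc : i = S ∧ j = S + L
  · obtain ⟨hc1, hc2⟩ := hc
    have hgeq : pvGet (pvSet (pvSet m S (S + L) (pre.getD (S + L + 1) 0 - pre.getD S 0)) S (S + L)
        (pvMaxAbs b (pre.getD (S + L + 1) 0 - pre.getD S 0))) S (S + L)
        = pvMaxAbs b (pre.getD (S + L + 1) 0 - pre.getD S 0) := by
      rw [pvGet_pvSet, if_pos ⟨rfl, rfl, by omega, by
        rw [pvRow_len hm1len hm1rows (show S < n by omega)]; omega⟩]
    constructor
    · intro _
      rw [hc1, hc2, hgeq, hFse]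
    · intro hq
      exact absurd ⟨by omega, Or.inr ⟨by omega, by omega⟩⟩ hq
  · constructor
    · intro hq
      rw [pvGet_pvSet, if_neg (by tauto), hget1 i j hc]
      refine (hval i j hi hj).1 ⟨hq.1, ?_⟩
      have := hq.2
      omega
    · intro hq
      rw [pvGet_pvSet, if_neg (by tauto), hget1 i j hc]
      refine (hval i j hi hj).2 (fun hp => hq ⟨hp.1, ?_⟩)
      have := hp.2
      omega

theorem pvInvA_init (pre : List Int) (n : Nat) :
    pvInvA pre n (fun i j => j - i < 0 + 1)
      (List.replicate n (List.replicate n (0 : Int))) := by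
  refine ⟨List.length_replicate, ?_, ?_⟩
  · intro r hr
    rw [List.eq_of_mem_replicate hr]
    exact List.length_replicate
  · intro i j hi hj
    have hz : pvGet (List.replicate n (List.replicate n (0 : Int))) i j = 0 := by
      unfold pvGet
      simp [List.getD_eq_getElem?_getD, hi, hj]
    constructor
    · intro hq
      have : i = j := by omega
      subst this
      rw [hz, pvFI_diag]
    · intro _
      exact hz

theorem optA_eq (tab : List Int) (h : tab ≠ []) :
    opt_sum tab = |pvFI (pvPrefixA tab) 0 (tab.length - 1)| := by
  have hn : 0 < tab.length := List.length_pos_of_ne_nil h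
  simp only [opt_sum]
  have houter : pvInvA (pvPrefixA tab) tab.length
      (fun i j => j - i < (tab.length - 1) + 1)
      ((List.range (tab.length - 1)).foldl
        (fun m L0 => (List.range (tab.length - (L0 + 1))).foldl
          (pvStepA (pvPrefixA tab) (L0 + 1)) m)
        (List.replicate tab.length (List.replicate tab.length (0 : Int)))) := by
    refine pv_foldl_range_inv
      (fun L0 m => pvInvA (pvPrefixA tab) tab.length (fun i j => j - i < L0 + 1) m)
      (tab.length - 1) _ _ (pvInvA_init _ _) ?_
    intro k m hk hm
    have hinner := pv_foldl_range_inv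
      (fun S m => pvInvA (pvPrefixA tab) tab.length
        (fun i j => j - i < k + 1 ∨ (j - i = k + 1 ∧ i < S)) m)
      (tab.length - (k + 1)) (pvStepA (pvPrefixA tab) (k + 1)) m
      (pvInvA_congr (fun i j _ _ _ => by omega) hm)
      (fun S b hS hb => pvStepA_inv _ _ _ _ _ (by omega) (by omega) hb)
    exact pvInvA_congr (fun i j hi hj hij => by omega) hinner
  obtain ⟨_, _, hval⟩ := houter
  rw [(hval 0 (tab.length - 1) (by omega) (by omega)).1 ⟨by omega, by omega⟩]

theorem pvGetO_replicate (n i j : Nat) :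
    pvGetO (List.replicate n (List.replicate n (none : Option Int))) i j = none := by
  simp only [pvGetO, List.getD_eq_getElem?_getD, List.getElem?_replicate]
  split_ifs <;> simp

theorem optB_eq (tab : List Int) (h : tab ≠ []) :
    opt_sum_alt tab = |pvFI (pvPrefixB tab) 0 (tab.length - 1)| := by
  have hn : 0 < tab.length := List.length_pos_of_ne_nil h
  simp only [opt_sum_alt]
  have hinv : pvInvM (pvPrefixB tab)
      (List.replicate tab.length (List.replicate tab.length (none : Option Int))) := by
    intro i j v hv
    rw [pvGetO_replicate] at hv
    cases hv
  have hmain := pvSolveB_correct (pvPrefixB tab) tab.length 0 ((tab.length : Int) - 1)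
    (List.replicate tab.length (List.replicate tab.length (none : Option Int)))
    (le_refl 0) (by omega) (by omega) hinv
  rw [hmain.1, show ((0 : Int)).toNat = 0 from rfl,
      show (((tab.length : Int)) - 1).toNat = tab.length - 1 from by omega]

theorem opt_eq (tab : List Int) (h : tab ≠ []) : opt_sum tab = opt_sum_alt tab := by
  rw [optA_eq tab h, optB_eq tab h]
  rfl

-- ===== VERDICT (by name: the statement is the Claim_ definition above) =====
theorem opt_sum_spec : Claim_equal_opt_sum := by
  intro tab _ hpre
  exact opt_eq tab hpre
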